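-- pv_equiv track=rewrite | github.com/power88/nanobot-awen | nanobot/agent/skill_validation.py | _parse_simple_frontmatter
-- ===== SOURCE A (Python) =====
-- from typing import Any, Optional
--
-- def _parse_simple_frontmatter(frontmatter_text: str) -> Optional[dict[str, str]]:
--     """Fallback parser for simple frontmatter when PyYAML is unavailable."""
--     parsed: dict[str, str] = {}
--     current_key: Optional[str] = None
--     multiline_key: Optional[str] = None
--
--     for raw_line in frontmatter_text.splitlines():
--         stripped = raw_line.strip()
--         if not stripped or stripped.startswith("#"):
--             continue
--
--         is_indented = raw_line[:1].isspace()
--         if is_indented: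
--             if current_key is None:
--                 return None
--             current_value = parsed[current_key]
--             parsed[current_key] = f"{current_value}\n{stripped}" if current_value else stripped
--             continue
--
--         if ":" not in stripped:
--             return None
--
--         key, value = stripped.split(":", 1)
--         key = key.strip()
--         value = value.strip()
--         if not key:
--             return None
--
--         if value in {"|", ">"}:
--             parsed[key] = ""
--             current_key = key
--             multiline_key = key
--             continue
--
--         if (value.startswith('"') and value.endswith('"')) or (
--             value.startswith("'") and value.endswith("'")
--         ):
--             value = value[1:-1]
--         parsed[key] = value
--         current_key = key
--         multiline_key = None
--
--     if multiline_key is not None and multiline_key not in parsed: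
--         return None
--     return parsed
-- ===== SOURCE B (Python) =====
-- from typing import Optional
--
-- def _join_continuation(value: str, line: str) -> str:
--     return f"{value}\n{line}" if value else line
--
-- def _parse_header(header: str) -> Optional[tuple[str, str]]:
--     """Parse one 'key: value' header line; None if invalid."""
--     if ":" not in header:
--         return None
--     key, value = header.split(":", 1)
--     key = key.strip()
--     if not key:
--         return None
--     value = value.strip()
--     if value in ("|", ">"):
--         value = ""
--     elif (value.startswith('"') and value.endswith('"')) or (
--         value.startswith("'") and value.endswith("'")
--     ):
--         value = value[1:-1]
--     return key, value
--
-- def _parse_simple_frontmatter(frontmatter_text: str) -> Optional[dict[str, str]]: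
--     """Two-pass fallback parser: group lines into entries, then parse each entry."""
--     # Pass 1: group kept lines into (header, continuation-lines) entries.
--     entries: list[tuple[str, list[str]]] = []
--     for raw_line in frontmatter_text.splitlines():
--         stripped = raw_line.strip()
--         if not stripped or stripped.startswith("#"):
--             continue
--         if raw_line[:1].isspace():
--             if not entries:
--                 return None
--             entries[-1][1].append(stripped)
--         else:
--             entries.append((stripped, []))
--     # Pass 2: parse each header and attach its continuation lines.
--     parsed: dict[str, str] = {}
--     for header, continuations in entries:
--         head = _parse_header(header)
--         if head is None:
--             return None
--         key, value = head
--         for line in continuations: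
--             value = _join_continuation(value, line)
--         parsed[key] = value
--     return parsed
-- ===== Notes on version B (the rewrite author's own statement) =====
-- stated objective: alternative
-- what changed: A's single stateful loop (dict mutated per line with current-key/multiline-key state) is replaced by two passes: group lines into header-plus-continuation entries, then parse each entry independently into the dict; A's unreachable final membership check after the loop is dropped.
import Mathlib
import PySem

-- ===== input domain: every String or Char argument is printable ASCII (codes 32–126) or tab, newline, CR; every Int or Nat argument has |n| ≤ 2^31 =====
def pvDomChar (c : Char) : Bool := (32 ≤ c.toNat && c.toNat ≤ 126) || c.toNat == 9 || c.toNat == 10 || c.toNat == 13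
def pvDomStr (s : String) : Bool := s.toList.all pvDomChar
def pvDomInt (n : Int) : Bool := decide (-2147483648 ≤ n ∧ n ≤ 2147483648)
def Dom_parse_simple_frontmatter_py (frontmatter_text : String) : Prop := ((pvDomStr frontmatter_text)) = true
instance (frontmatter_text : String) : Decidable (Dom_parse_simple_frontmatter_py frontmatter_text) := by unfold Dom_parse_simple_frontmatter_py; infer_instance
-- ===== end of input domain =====

-- B replaces A's single stateful loop by two passes (group lines into header+continuation
-- entries, then parse each entry) and drops A's unreachable final membership check;
-- same return value everywhere (objective: alternative decomposition).

-- ===== PORT A =====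
-- A's loop over splitlines with state (parsed, current_key, multiline_key); `return None` = none.
def pvALoop : List (List Char) → PySem.Dict (List Char) (List Char) → Option (List Char) →
    Option (List Char) → Option (PySem.Dict (List Char) (List Char))
  | [], parsed, _, mk =>
      -- `if multiline_key is not None and multiline_key not in parsed: return None`
      match mk with
      | some k => if parsed.contains k then some parsed else none
      | none => some parsed
  | raw :: rest, parsed, ck, mk =>
      let stripped := PySem.Chars.strip raw
      if stripped.isEmpty || PySem.Chars.startswith stripped ['#'] then
        pvALoop rest parsed ck mk
      else if PySem.Chars.strIsspace (PySem.Chars.slice raw (some 0) (some 1)) then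
        -- indented continuation line
        match ck with
        | none => none
        | some k =>
          match parsed.get? k with
          | none => none  -- KeyError (unreachable: current_key is always a key of parsed)
          | some cv =>
            pvALoop rest
              (parsed.insert k (if cv.isEmpty then stripped else cv ++ '\n' :: stripped)) ck mk
      else if !PySem.Chars.isIn [':'] stripped then none
      else
        match PySem.Chars.splitOnMax stripped [':'] 1 with
        | [k0, v0] =>
          let key := PySem.Chars.strip k0
          let value := PySem.Chars.strip v0
          if key.isEmpty then none
          else if value = ['|'] ∨ value = ['>'] then
            pvALoop rest (parsed.insert key []) (some key) (some key)
          else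
            let value :=
              if (PySem.Chars.startswith value ['"'] && PySem.Chars.endswith value ['"']) ||
                 (PySem.Chars.startswith value ['\''] && PySem.Chars.endswith value ['\'']) then
                PySem.Chars.slice value (some 1) (some (-1))
              else value
            pvALoop rest (parsed.insert key value) (some key) none
        | _ => none  -- unpacking `key, value = stripped.split(":", 1)` (unreachable: ':' in stripped)

def parse_simple_frontmatter_py (frontmatter_text : String) : Option (List (String × String)) :=
  match pvALoop (PySem.Chars.splitlines frontmatter_text.toList) PySem.Dict.empty none none with
  | none => none
  | some d => some (d.items.map (fun p => (String.ofList p.1, String.ofList p.2)))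

-- ===== PORT B =====
-- `_join_continuation(value, line)`
def pvBJoin (v line : List Char) : List Char :=
  if v.isEmpty then line else v ++ '\n' :: line

-- `_parse_header(header)`
def pvBHeader (header : List Char) : Option (List Char × List Char) :=
  if !PySem.Chars.isIn [':'] header then none
  else
    match PySem.Chars.splitOnMax header [':'] 1 with
    | [k0, v0] =>
      let key := PySem.Chars.strip k0
      if key.isEmpty then none
      else
        let value := PySem.Chars.strip v0
        let value :=
          if value = ['|'] ∨ value = ['>'] then []
          else if (PySem.Chars.startswith value ['"'] && PySem.Chars.endswith value ['"']) ||
                  (PySem.Chars.startswith value ['\''] && PySem.Chars.endswith value ['\'']) then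
            PySem.Chars.slice value (some 1) (some (-1))
          else value
        some (key, value)
    | _ => none

-- pass 1: group lines into (header, continuations) entries; `entries[-1][1].append` is
-- transcribed with the entries list kept reversed (head = last entry), reversed at the end.
def pvBGroup : List (List Char) → List (List Char × List (List Char)) →
    Option (List (List Char × List (List Char)))
  | [], acc => some acc.reverse
  | raw :: rest, acc =>
      let stripped := PySem.Chars.strip raw
      if stripped.isEmpty || PySem.Chars.startswith stripped ['#'] then
        pvBGroup rest acc
      else if PySem.Chars.strIsspace (PySem.Chars.slice raw (some 0) (some 1)) then
        match acc with
        | [] => none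
        | (h, cs) :: tl => pvBGroup rest ((h, cs ++ [stripped]) :: tl)
      else pvBGroup rest ((stripped, []) :: acc)

-- pass 2: parse each entry into the dict
def pvBParse : List (List Char × List (List Char)) → PySem.Dict (List Char) (List Char) →
    Option (PySem.Dict (List Char) (List Char))
  | [], d => some d
  | (h, cs) :: rest, d =>
      match pvBHeader h with
      | none => none
      | some (k, v) => pvBParse rest (d.insert k (cs.foldl pvBJoin v))

def parse_simple_frontmatter_py_alt (frontmatter_text : String) : Option (List (String × String)) :=
  match pvBGroup (PySem.Chars.splitlines frontmatter_text.toList) [] with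
  | none => none
  | some entries =>
      match pvBParse entries PySem.Dict.empty with
      | none => none
      | some d => some (d.items.map (fun p => (String.ofList p.1, String.ofList p.2)))

-- ===== PRECONDITION & SPEC =====
def Spec_parse_simple_frontmatter_py (frontmatter_text : String) (out : Option (List (String × String))) : Prop := out = parse_simple_frontmatter_py_alt frontmatter_text
instance (frontmatter_text : String) (out : Option (List (String × String))) : Decidable (Spec_parse_simple_frontmatter_py frontmatter_text out) := by unfold Spec_parse_simple_frontmatter_py; infer_instance

-- ===== CLAIM (what is proved, stated in full; the proofs are below) =====
def Claim_equal_parse_simple_frontmatter_py : Prop := ∀ (frontmatter_text : String), Dom_parse_simple_frontmatter_py frontmatter_text → Spec_parse_simple_frontmatter_py frontmatter_text (parse_simple_frontmatter_py frontmatter_text)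

-- ===== LEMMAS AND PROOFS =====

lemma pvBParse_append (l₁ l₂ : List (List Char × List (List Char)))
    (d : PySem.Dict (List Char) (List Char)) :
    pvBParse (l₁ ++ l₂) d = (pvBParse l₁ d).bind (fun d' => pvBParse l₂ d') := by
  induction l₁ generalizing d with
  | nil => rfl
  | cons p tl ih =>
      obtain ⟨h, cs⟩ := p
      simp only [List.cons_append, pvBParse]
      cases pvBHeader h with
      | none => rfl
      | some kv => obtain ⟨k, v⟩ := kv; exact ih _

-- grouping from a nonempty accumulator preserves the earlier entries and the current header
lemma pvBGroup_shape (lines : List (List Char)) (h : List Char) (cs : List (List Char))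
    (tl : List (List Char × List (List Char))) :
    pvBGroup lines ((h, cs) :: tl) = none ∨
    ∃ cs' tail, pvBGroup lines ((h, cs) :: tl) = some (tl.reverse ++ (h, cs') :: tail) := by
  induction lines generalizing h cs tl with
  | nil => exact Or.inr ⟨cs, [], by simp [pvBGroup]⟩
  | cons raw rest ih =>
      simp only [pvBGroup]
      split
      · exact ih h cs tl
      · split
        · exact ih h (cs ++ [PySem.Chars.strip raw]) tl
        · rcases ih (PySem.Chars.strip raw) [] ((h, cs) :: tl) with hn | ⟨cs2, t2, heq⟩
          · exact Or.inl hn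
          · exact Or.inr ⟨cs, (PySem.Chars.strip raw, cs2) :: t2, by simp [heq]⟩

-- a header whose entry cannot be parsed makes the whole of B fail
lemma pvBadHeader (lines : List (List Char)) (s : List Char) (cs : List (List Char))
    (acc : List (List Char × List (List Char))) (parsed : PySem.Dict (List Char) (List Char))
    (h1 : pvBParse acc.reverse PySem.Dict.empty = some parsed)
    (hbh : pvBHeader s = none) :
    (pvBGroup lines ((s, cs) :: acc)).bind (fun es => pvBParse es PySem.Dict.empty) = none := by
  rcases pvBGroup_shape lines s cs acc with hn | ⟨cs', tail, heq⟩
  · rw [hn]; rfl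
  · rw [heq]
    simp only [Option.bind_some]
    rw [pvBParse_append, h1]
    simp [pvBParse, hbh]

-- main invariant lemma: A's loop equals (group-then-parse) from a matching state
lemma pvMain (lines : List (List Char)) (parsed : PySem.Dict (List Char) (List Char))
    (ck mk : Option (List Char)) (acc : List (List Char × List (List Char)))
    (h1 : pvBParse acc.reverse PySem.Dict.empty = some parsed)
    (h2 : acc = [] → ck = none)
    (h3 : ∀ h cs tl, acc = (h, cs) :: tl →
      ∃ k v, pvBHeader h = some (k, v) ∧ ck = some k ∧
        parsed.get? k = some (cs.foldl pvBJoin v))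
    (h4 : mk = none ∨ mk = ck) :
    pvALoop lines parsed ck mk =
      (pvBGroup lines acc).bind (fun es => pvBParse es PySem.Dict.empty) := by
  induction lines generalizing parsed ck mk acc with
  | nil =>
      simp only [pvALoop, pvBGroup, Option.bind_some, h1]
      cases mk with
      | none => rfl
      | some j =>
          rcases h4 with h4 | h4
          · exact absurd h4 (by simp)
          · cases acc with
            | nil => exact absurd (h4.trans (h2 rfl)) (by simp)
            | cons p tl =>
                obtain ⟨k, v, _, hck, hget⟩ := h3 p.1 p.2 tl (by simp)
                have hjk : j = k := Option.some.inj (h4.trans hck)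
                subst hjk
                show (if parsed.contains j = true then some parsed else none) = some parsed
                rw [PySem.Dict.contains_eq_isSome_get?, hget]
                rfl
  | cons raw rest ih =>
      simp only [pvALoop, pvBGroup]
      by_cases hskip : ((PySem.Chars.strip raw).isEmpty || PySem.Chars.startswith (PySem.Chars.strip raw) ['#']) = true
      · simp only [hskip, if_true]
        exact ih parsed ck mk acc h1 h2 h3 h4
      · simp only [Bool.not_eq_true] at hskip
        simp only [hskip, Bool.false_eq_true, if_false]
        by_cases hind : PySem.Chars.strIsspace (PySem.Chars.slice raw (some 0) (some 1)) = true
        · -- continuation line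
          simp only [hind, if_true]
          cases acc with
          | nil => rw [h2 rfl]; rfl
          | cons p tl =>
              obtain ⟨h, cs⟩ := p
              obtain ⟨k, v, hhead, hck, hget⟩ := h3 h cs tl rfl
              subst hck
              simp only [hget]
              rw [List.reverse_cons, pvBParse_append] at h1
              cases hd0 : pvBParse tl.reverse PySem.Dict.empty with
              | none => rw [hd0] at h1; exact absurd h1 (by simp)
              | some d0 =>
                  rw [hd0] at h1
                  simp only [Option.bind_some, pvBParse, hhead] at h1
                  have hins : d0.insert k (cs.foldl pvBJoin v) = parsed := by
                    simpa [pvBParse] using h1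
                  have hnewval : ((cs ++ [PySem.Chars.strip raw]).foldl pvBJoin v) =
                      (if (cs.foldl pvBJoin v).isEmpty then PySem.Chars.strip raw
                       else cs.foldl pvBJoin v ++ '\n' :: PySem.Chars.strip raw) := by
                    rw [List.foldl_append]; rfl
                  refine ih _ (some k) mk ((h, cs ++ [PySem.Chars.strip raw]) :: tl) ?_ (by simp) ?_ h4
                  · rw [List.reverse_cons, pvBParse_append, hd0]
                    simp only [Option.bind_some, pvBParse, hhead, hnewval]
                    rw [← hins, PySem.Dict.insert_insert_self]
                  · intro h' cs' tl' heq
                    rw [List.cons.injEq, Prod.mk.injEq] at heq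
                    obtain ⟨⟨rfl, rfl⟩, rfl⟩ := heq
                    exact ⟨k, v, hhead, rfl, by rw [PySem.Dict.get?_insert_self, hnewval]⟩
        · -- header line
          simp only [Bool.not_eq_true] at hind
          simp only [hind, Bool.false_eq_true, if_false]
          -- uniform success step: once the header parses, both sides recurse in lockstep
          have hsucc : ∀ (key val : List Char) (mk' : Option (List Char)),
              pvBHeader (PySem.Chars.strip raw) = some (key, val) →
              (mk' = none ∨ mk' = some key) →
              pvALoop rest (parsed.insert key val) (some key) mk' =
                (pvBGroup rest ((PySem.Chars.strip raw, []) :: acc)).bind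
                  (fun es => pvBParse es PySem.Dict.empty) := by
            intro key val mk' hbh hmk
            refine ih _ (some key) mk' ((PySem.Chars.strip raw, []) :: acc) ?_ (by simp) ?_ hmk
            · rw [List.reverse_cons, pvBParse_append, h1]
              simp [pvBParse, hbh]
            · intro h' cs' tl' heq
              rw [List.cons.injEq, Prod.mk.injEq] at heq
              obtain ⟨⟨rfl, rfl⟩, rfl⟩ := heq
              exact ⟨key, val, hbh, rfl, by simp [List.foldl, PySem.Dict.get?_insert_self]⟩
          by_cases hcol : PySem.Chars.isIn [':'] (PySem.Chars.strip raw) = true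
          · simp only [hcol, Bool.not_true, Bool.false_eq_true, if_false]
            cases hsp : PySem.Chars.splitOnMax (PySem.Chars.strip raw) [':'] 1 with
            | nil =>
                exact (pvBadHeader rest _ [] acc parsed h1 (by simp [pvBHeader, hcol, hsp])).symm
            | cons k0 rest2 =>
              cases rest2 with
              | nil =>
                  exact (pvBadHeader rest _ [] acc parsed h1 (by simp [pvBHeader, hcol, hsp])).symm
              | cons v0 rest3 =>
                cases rest3 with
                | cons _ _ =>
                    exact (pvBadHeader rest _ [] acc parsed h1 (by simp [pvBHeader, hcol, hsp])).symm
                | nil =>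
                    by_cases hk : (PySem.Chars.strip k0).isEmpty = true
                    · simp only [hk, if_true]
                      exact (pvBadHeader rest _ [] acc parsed h1
                        (by simp [pvBHeader, hcol, hsp, hk])).symm
                    · simp only [hk, Bool.false_eq_true, if_false]
                      by_cases hml : (PySem.Chars.strip v0 = ['|'] ∨ PySem.Chars.strip v0 = ['>'])
                      · rw [if_pos hml]
                        exact hsucc _ [] _ (by simp [pvBHeader, hcol, hsp, hk, hml]) (Or.inr rfl)
                      · rw [if_neg hml]
                        exact hsucc _ _ none (by simp [pvBHeader, hcol, hsp, hk, hml]) (Or.inl rfl)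
          · simp only [Bool.not_eq_true] at hcol
            simp only [hcol, Bool.not_false, if_true]
            exact (pvBadHeader rest _ [] acc parsed h1 (by simp [pvBHeader, hcol])).symm

-- ===== VERDICT (by name: the statement is the Claim_ definition above) =====
theorem parse_simple_frontmatter_py_spec : Claim_equal_parse_simple_frontmatter_py := by
  intro t _
  unfold Spec_parse_simple_frontmatter_py parse_simple_frontmatter_py parse_simple_frontmatter_py_alt
  rw [pvMain (PySem.Chars.splitlines t.toList) PySem.Dict.empty none none []
    rfl (fun _ => rfl) (fun _ _ _ h => by cases h) (Or.inl rfl)]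
  cases pvBGroup (PySem.Chars.splitlines t.toList) [] with
  | none => rfl
  | some es => cases pvBParse es PySem.Dict.empty <;> rfl
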